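-- pv_equiv track=rewrite | github.com/MDJuniooor/Algorithm | CodingTest_5th/test3.py | solution
-- ===== SOURCE A (Python) =====
-- def solution(n):
--     num = []
--     while n // 4 > 0:
--         remains = n % 4
--         n = n // 4
--         num.append(remains)
--     num.append(n)
--     ans = sum(num)
--     if ans % 2:
--         return 'SS'
--     else:
--         return 'HS'
-- ===== SOURCE B (Python) =====
-- def solution(n):
--     def f(m):
--         if m < 4:
--             return m
--         return m % 4 + f(m // 4)
--     return 'SS' if f(n) % 2 else 'HS'
-- ===== Notes on version B (the rewrite author's own statement) =====
-- stated objective: simpler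
-- what changed: Replaces A's while-loop that appends each base-4 digit to a list and then sums it with a direct recursive digit-sum helper, never materialising the list.
import Mathlib
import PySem

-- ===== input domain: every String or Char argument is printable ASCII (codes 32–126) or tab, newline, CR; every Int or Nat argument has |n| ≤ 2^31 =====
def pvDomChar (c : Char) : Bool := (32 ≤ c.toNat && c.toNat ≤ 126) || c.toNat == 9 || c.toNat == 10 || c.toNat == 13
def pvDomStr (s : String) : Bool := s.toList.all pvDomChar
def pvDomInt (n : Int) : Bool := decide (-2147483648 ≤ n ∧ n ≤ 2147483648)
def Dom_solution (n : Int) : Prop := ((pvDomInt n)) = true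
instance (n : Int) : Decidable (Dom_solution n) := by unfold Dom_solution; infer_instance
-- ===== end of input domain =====

-- B replaces A's list-building while-loop with a direct recursive base-4 digit sum (simpler decomposition).


-- ===== PORT A =====
-- the while-loop of A, carried state: current n and the list num
def solutionLoop (n : Int) (num : List Int) : List Int :=
  if PySem.Int.floordiv n 4 > 0 then
    solutionLoop (PySem.Int.floordiv n 4) (num ++ [PySem.Int.mod n 4])
  else num ++ [n]
termination_by n.toNat
decreasing_by
  rename_i h
  rw [PySem.Int.floordiv_eq_ediv_of_pos (by norm_num)] at h ⊢
  omega

def solution (n : Int) : String :=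
  let num := solutionLoop n []
  let ans := num.sum
  if PySem.Int.mod ans 2 ≠ 0 then "SS" else "HS"

-- ===== PORT B =====
def digitSum (m : Int) : Int :=
  if m < 4 then m else PySem.Int.mod m 4 + digitSum (PySem.Int.floordiv m 4)
termination_by m.toNat
decreasing_by
  rename_i h
  rw [PySem.Int.floordiv_eq_ediv_of_pos (by norm_num)]
  omega

def solution_alt (n : Int) : String :=
  if PySem.Int.mod (digitSum n) 2 ≠ 0 then "SS" else "HS"

-- ===== PRECONDITION & SPEC =====
def Spec_solution (n : Int) (out : String) : Prop := out = solution_alt n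
instance (n : Int) (out : String) : Decidable (Spec_solution n out) := by unfold Spec_solution; infer_instance

-- ===== CLAIM (what is proved, stated in full; the proofs are below) =====
def Claim_equal_solution : Prop := ∀ (n : Int), Dom_solution n → Spec_solution n (solution n)

-- ===== LEMMAS AND PROOFS =====
theorem solutionLoop_sum (n : Int) (num : List Int) :
    (solutionLoop n num).sum = num.sum + digitSum n := by
  induction n, num using solutionLoop.induct with
  | case1 n num h ih =>
      rw [solutionLoop, if_pos h, ih]
      conv_rhs => rw [digitSum]
      rw [if_neg (by rw [PySem.Int.floordiv_eq_ediv_of_pos (by norm_num)] at h; omega)]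
      simp; ring
  | case2 n num h =>
      rw [solutionLoop, if_neg h]
      conv_rhs => rw [digitSum]
      rw [if_pos (by rw [PySem.Int.floordiv_eq_ediv_of_pos (by norm_num)] at h; omega)]
      simp

-- ===== VERDICT (by name: the statement is the Claim_ definition above) =====
theorem solution_spec : Claim_equal_solution := by
  intro n _
  unfold Spec_solution solution solution_alt
  simp only [solutionLoop_sum, List.sum_nil, zero_add]
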